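-- pv_equiv track=rewrite | github.com/oreolic/UMI_New | Executor/DataParsing.py | Divide_Dictionary
-- ===== SOURCE A (Python) =====
-- def Divide_Dictionary(dic, N):
--     List = []
--     tup = [(i,dic[i]) for i in dic]
--
--     for i in range(N):
--         begin = (len(tup)//N)*i
--         end = (len(tup) // N) * (i + 1)
--
--         if i != N-1:
--             List.append(tup[begin:end])
--         else:
--             List.append(tup[begin:])
--
--     DicList = []
--
--
--     for k in List:
--         DicList.append(dict(k))
--     return DicList
-- ===== SOURCE B (Python) =====
-- def Divide_Dictionary(dic, N):
--     if N <= 0: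
--         return []
--     items = list(dic.items())
--     size = len(items) // N
--     chunks = [dict() for _ in range(N)]
--     for j, (k, v) in enumerate(items):
--         idx = min(j // size, N - 1) if size > 0 else N - 1
--         chunks[idx][k] = v
--     return chunks
-- ===== Notes on version B (the rewrite author's own statement) =====
-- stated objective: alternative
-- what changed: B replaces A's slicing strategy (compute N begin/end offsets, cut the item list into N slices, then dict-ify each slice in a second pass) with a distribution strategy: pre-create N empty dicts and make a single pass over the enumerated items, routing item j into chunk min(j//size, N-1) (last chunk when size==0), so no slice is ever materialised.
import Mathlib
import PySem

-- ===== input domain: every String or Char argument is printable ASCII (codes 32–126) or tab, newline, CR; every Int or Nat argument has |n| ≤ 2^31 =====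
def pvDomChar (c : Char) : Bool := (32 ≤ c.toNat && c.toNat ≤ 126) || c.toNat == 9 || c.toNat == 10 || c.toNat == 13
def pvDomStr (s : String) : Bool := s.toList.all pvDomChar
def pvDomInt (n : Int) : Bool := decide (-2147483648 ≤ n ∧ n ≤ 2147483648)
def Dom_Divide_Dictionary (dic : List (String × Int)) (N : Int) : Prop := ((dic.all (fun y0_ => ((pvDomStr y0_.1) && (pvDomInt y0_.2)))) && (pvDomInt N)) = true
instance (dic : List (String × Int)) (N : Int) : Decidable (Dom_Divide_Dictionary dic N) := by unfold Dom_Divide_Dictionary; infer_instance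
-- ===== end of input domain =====

-- B replaces A's slice-then-dictify strategy by a single distributing pass into N pre-created dicts (alternative decomposition, same cost).
-- ===== PORT A =====
def Divide_Dictionary (dic : List (String × Int)) (N : Int) : List (List (String × Int)) :=
  let d := PySem.Dict.ofList dic
  let tup := d.keys.map (fun i => (i, d.getD i 0))      -- [(i, dic[i]) for i in dic]
  let L := (PySem.List.pyRange 0 N 1).foldl (fun L i =>
      let bg := PySem.Int.floordiv (PySem.List.len tup) N * i
      let en := PySem.Int.floordiv (PySem.List.len tup) N * (i + 1)
      if i ≠ N - 1 then L ++ [PySem.List.slice tup (some bg) (some en)]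
      else L ++ [PySem.List.slice tup (some bg) none]) []
  L.foldl (fun DL k => DL ++ [(PySem.Dict.ofList k).items]) []

-- ===== PORT B =====
def Divide_Dictionary_alt (dic : List (String × Int)) (N : Int) : List (List (String × Int)) :=
  if N ≤ 0 then []
  else
    let items := (PySem.Dict.ofList dic).items
    let size := PySem.Int.floordiv (PySem.List.len items) N
    let chunks0 : List (PySem.Dict String Int) :=
      (PySem.List.pyRange 0 N 1).map (fun _ => PySem.Dict.empty)   -- [dict() for _ in range(N)]
    let chunks := (PySem.List.enumerate items).foldl
      (fun cs p =>
        let idx := if size > 0 then min (PySem.Int.floordiv p.1 size) (N - 1) else N - 1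
        -- 0 ≤ idx < N always holds here, so Python's chunks[idx][k] = v is List.modify at idx
        cs.modify idx.toNat (fun d => d.insert p.2.1 p.2.2)) chunks0
    chunks.map (fun d => d.items)

-- ===== PRECONDITION & SPEC =====
def Spec_Divide_Dictionary (dic : List (String × Int)) (N : Int) (out : List (List (String × Int))) : Prop := out = Divide_Dictionary_alt dic N
instance (dic : List (String × Int)) (N : Int) (out : List (List (String × Int))) : Decidable (Spec_Divide_Dictionary dic N out) := by unfold Spec_Divide_Dictionary; infer_instance

-- ===== CLAIM (what is proved, stated in full; the proofs are below) =====
def Claim_equal_Divide_Dictionary : Prop := ∀ (dic : List (String × Int)) (N : Int), Dom_Divide_Dictionary dic N → Spec_Divide_Dictionary dic N (Divide_Dictionary dic N)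

-- ===== LEMMAS AND PROOFS =====

-- a list of pairs with distinct first components is its own dict
theorem pvItems_ofList (l : List (String × Int)) (h : (l.map Prod.fst).Nodup) :
    (PySem.Dict.ofList l).items = l := by
  show (PySem.Dict.update PySem.Dict.empty l).items = l
  unfold PySem.Dict.update
  rw [PySem.Dict.items_foldl_insert_fresh l Prod.fst Prod.snd PySem.Dict.empty
    (fun a _ => by simp [pysem]) h]
  simp [PySem.Dict.empty]

-- cell i of a modify-at-index loop is the fold of the items routed to i
theorem pvFoldlModifyGet? {α β : Type} (g : β → Nat) (h : β → α → α) (l : List β) (cs : List α)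
    (i : Nat) :
    (l.foldl (fun cs x => cs.modify (g x) (h x)) cs)[i]?
      = cs[i]?.map (fun c => (l.filter (fun x => g x == i)).foldl (fun a x => h x a) c) := by
  induction l generalizing cs with
  | nil => simp
  | cons a l ih =>
    rw [List.foldl_cons, ih (cs.modify (g a) (h a)), List.getElem?_modify]
    by_cases hg : g a = i
    · rw [List.filter_cons_of_pos (by simpa using hg)]
      cases cs[i]? <;> simp [hg]
    · rw [List.filter_cons_of_neg (by simpa using hg)]
      cases cs[i]? <;> simp [hg]

-- the items of t whose index is ≥ a are t.drop (a - s) (indices starting at s)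
theorem pvEnumFilterGe {α : Type} : ∀ (t : List α) (a s : Nat),
    ((PySem.List.enumerate t (s : Int)).filter (fun p => decide ((a : Int) ≤ p.1))).map Prod.snd
      = t.drop (a - s) := by
  intro t
  induction t with
  | nil => intro a s; simp [PySem.List.enumerate_nil]
  | cons x t ih =>
    intro a s
    rw [PySem.List.enumerate_cons]
    have hc : (s : Int) + 1 = ((s + 1 : Nat) : Int) := by push_cast; ring
    by_cases hle : a ≤ s
    · rw [List.filter_cons_of_pos (by simp; omega), List.map_cons, hc, ih a (s + 1)]
      have h1 : a - s = 0 := by omega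
      have h2 : a - (s + 1) = 0 := by omega
      rw [h1, h2, List.drop_zero, List.drop_zero]
    · rw [List.filter_cons_of_neg (by simp; omega), hc, ih a (s + 1)]
      have h1 : a - s = (a - (s + 1)) + 1 := by omega
      rw [h1, List.drop_succ_cons]

-- the items of t whose index lies in [a, b) are (t.drop (a - s)).take (b - max a s)
theorem pvEnumFilterBetween {α : Type} : ∀ (t : List α) (a b s : Nat),
    ((PySem.List.enumerate t (s : Int)).filter
        (fun p => decide ((a : Int) ≤ p.1 ∧ p.1 < (b : Int)))).map Prod.snd
      = (t.drop (a - s)).take (b - max a s) := by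
  intro t
  induction t with
  | nil => intro a b s; simp [PySem.List.enumerate_nil]
  | cons x t ih =>
    intro a b s
    rw [PySem.List.enumerate_cons]
    have hc : (s : Int) + 1 = ((s + 1 : Nat) : Int) := by push_cast; ring
    by_cases hin : a ≤ s ∧ s < b
    · rw [List.filter_cons_of_pos (by simp; omega), List.map_cons, hc, ih a b (s + 1)]
      have h1 : a - s = 0 := by omega
      have h2 : a - (s + 1) = 0 := by omega
      have h3 : b - max a s = (b - max a (s + 1)) + 1 := by omega
      rw [h1, h2, List.drop_zero, List.drop_zero, h3, List.take_succ_cons]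
    · rw [List.filter_cons_of_neg (by simp; omega), hc, ih a b (s + 1)]
      by_cases hgt : a ≤ s
      · -- then b ≤ s: both takes are empty
        have h3 : b - max a s = 0 := by omega
        have h4 : b - max a (s + 1) = 0 := by omega
        rw [h3, h4, List.take_zero, List.take_zero]
      · have h1 : a - s = (a - (s + 1)) + 1 := by omega
        have h2 : max a (s + 1) = max a s := by omega
        rw [h1, List.drop_succ_cons, h2]

-- an append-only loop whose body branches between two appended values is a map of the branch
theorem pvFoldlAppendBranch {α β : Type} (p : α → Prop) [DecidablePred p] (f g : α → β) :
    ∀ (l : List α) (acc : List β),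
      l.foldl (fun L i => if p i then L ++ [f i] else L ++ [g i]) acc
        = acc ++ l.map (fun i => if p i then f i else g i) := by
  intro l
  induction l with
  | nil => intro acc; simp
  | cons a l ih =>
    intro acc
    by_cases h : p a <;> simp [h, ih]

-- map-fst Nodup passes to any drop/take of the list
theorem pvNodupDrop (t : List (String × Int)) (h : (t.map Prod.fst).Nodup) (a : Nat) :
    ((t.drop a).map Prod.fst).Nodup :=
  h.sublist (List.Sublist.map _ (List.drop_sublist a t))

theorem pvNodupDropTake (t : List (String × Int)) (h : (t.map Prod.fst).Nodup) (a b : Nat) :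
    (((t.drop a).take b).map Prod.fst).Nodup :=
  h.sublist (List.Sublist.map _ ((List.take_sublist b (t.drop a)).trans (List.drop_sublist a t)))

-- with 0 < s:  min (j / s) m = k  names the interval the index j falls in
theorem pvMinDivEq (j s m k : Nat) (hs0 : 0 < s) (hk : k < m) :
    min (j / s) m = k ↔ s * k ≤ j ∧ j < s * (k + 1) := by
  constructor
  · intro h
    have hdk : j / s = k := by
      rcases Nat.le_total (j / s) m with h' | h'
      · rw [min_eq_left h'] at h; exact h
      · rw [min_eq_right h'] at h; omega
    constructor
    · have h := (Nat.le_div_iff_mul_le hs0).mp (le_of_eq hdk.symm)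
      rwa [Nat.mul_comm] at h
    · have h := (Nat.div_lt_iff_lt_mul hs0).mp (by omega : j / s < k + 1)
      rwa [Nat.mul_comm] at h
  · rintro ⟨h1, h2⟩
    have hle : k ≤ j / s := (Nat.le_div_iff_mul_le hs0).mpr (by rwa [Nat.mul_comm])
    have hlt : j / s < k + 1 := (Nat.div_lt_iff_lt_mul hs0).mpr (by rwa [Nat.mul_comm])
    have : j / s = k := by omega
    rw [this, min_eq_left (by omega)]

theorem pvMinDivEqTop (j s m : Nat) (hs0 : 0 < s) :
    min (j / s) m = m ↔ s * m ≤ j := by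
  constructor
  · intro h
    have hle : m ≤ j / s := by
      rcases Nat.le_total (j / s) m with h' | h'
      · rw [min_eq_left h'] at h; omega
      · exact h'
    have h := (Nat.le_div_iff_mul_le hs0).mp hle
    rwa [Nat.mul_comm] at h
  · intro h
    have hle : m ≤ j / s := (Nat.le_div_iff_mul_le hs0).mpr (by rwa [Nat.mul_comm])
    exact min_eq_right hle

-- B's routing pass, restricted to chunk k, selects exactly A's k-th slice of t
theorem pvRouteFilter (t : List (String × Int)) (m s k : Nat) (hk : k ≤ m) :
    ((PySem.List.enumerate t).filter
        (fun x => ((if ((s : Nat) : Int) > 0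
            then min (PySem.Int.floordiv x.1 ((s : Nat) : Int)) ((m : Nat) : Int)
            else ((m : Nat) : Int)).toNat == k))).map Prod.snd
      = if k = m then t.drop (s * k) else (t.drop (s * k)).take s := by
  by_cases hs0 : 0 < s
  · have hpos : ((s : Nat) : Int) > 0 := by exact_mod_cast hs0
    by_cases hkm : k = m
    · subst hkm
      rw [if_pos rfl]
      have hcong : ∀ x ∈ PySem.List.enumerate t,
          ((if ((s : Nat) : Int) > 0
              then min (PySem.Int.floordiv x.1 ((s : Nat) : Int)) ((k : Nat) : Int)
              else ((k : Nat) : Int)).toNat == k)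
            = decide ((((s * k : Nat) : Int)) ≤ x.1) := by
        intro x hx
        obtain ⟨j, hj, hxj⟩ := (PySem.List.mem_enumerate_iff t 0 x).mp hx
        rw [hxj]
        simp only [zero_add, if_pos hpos, PySem.Int.floordiv_natCast]
        rw [← Nat.cast_min, Int.toNat_natCast]
        rw [Bool.eq_iff_iff]
        simp only [beq_iff_eq, decide_eq_true_eq, Nat.cast_le]
        exact pvMinDivEqTop j s k hs0
      rw [List.filter_congr hcong]
      have := pvEnumFilterGe t (s * k) 0
      rw [Nat.cast_zero] at this
      rw [this, Nat.sub_zero]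
    · rw [if_neg hkm]
      have hklt : k < m := by omega
      have hcong : ∀ x ∈ PySem.List.enumerate t,
          ((if ((s : Nat) : Int) > 0
              then min (PySem.Int.floordiv x.1 ((s : Nat) : Int)) ((m : Nat) : Int)
              else ((m : Nat) : Int)).toNat == k)
            = decide ((((s * k : Nat) : Int)) ≤ x.1 ∧ x.1 < (((s * (k + 1) : Nat) : Int))) := by
        intro x hx
        obtain ⟨j, hj, hxj⟩ := (PySem.List.mem_enumerate_iff t 0 x).mp hx
        rw [hxj]
        simp only [zero_add, if_pos hpos, PySem.Int.floordiv_natCast]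
        rw [← Nat.cast_min, Int.toNat_natCast]
        rw [Bool.eq_iff_iff]
        simp only [beq_iff_eq, decide_eq_true_eq, Nat.cast_le, Nat.cast_lt]
        exact pvMinDivEq j s m k hs0 hklt
      rw [List.filter_congr hcong]
      have := pvEnumFilterBetween t (s * k) (s * (k + 1)) 0
      rw [Nat.cast_zero] at this
      rw [this, Nat.sub_zero, Nat.max_zero]
      congr 1
      rw [Nat.mul_succ]
      omega
  · have hs : s = 0 := by omega
    subst hs
    have hnpos : ¬ (((0 : Nat) : Int) > 0) := by simp
    by_cases hkm : k = m
    · subst hkm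
      rw [if_pos rfl]
      have hcong : ∀ x ∈ PySem.List.enumerate t,
          ((if ((0 : Nat) : Int) > 0
              then min (PySem.Int.floordiv x.1 ((0 : Nat) : Int)) ((k : Nat) : Int)
              else ((k : Nat) : Int)).toNat == k) = true := by
        intro x _
        rw [if_neg hnpos, Int.toNat_natCast]
        simp
      rw [List.filter_congr hcong, List.filter_true, PySem.List.map_snd_enumerate]
      simp
    · rw [if_neg hkm]
      have hcong : ∀ x ∈ PySem.List.enumerate t,
          ((if ((0 : Nat) : Int) > 0
              then min (PySem.Int.floordiv x.1 ((0 : Nat) : Int)) ((m : Nat) : Int)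
              else ((m : Nat) : Int)).toNat == k) = false := by
        intro x _
        rw [if_neg hnpos, Int.toNat_natCast]
        simpa using (Ne.symm hkm)
      rw [List.filter_congr hcong, List.filter_false]
      simp

-- ===== VERDICT (by name: the statement is the Claim_ definition above) =====
theorem Divide_Dictionary_spec : Claim_equal_Divide_Dictionary := by
  intro dic N _
  unfold Spec_Divide_Dictionary Divide_Dictionary Divide_Dictionary_alt
  simp only []
  by_cases hN : N ≤ 0
  · rw [if_pos hN, PySem.List.pyRange_one_eq_nil hN]
    simp
  · rw [if_neg hN]
    rw [not_le] at hN
    obtain ⟨m, hm⟩ : ∃ m : Nat, N = (m : Int) + 1 := ⟨(N - 1).toNat, by omega⟩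
    -- the comprehension over the dict's keys is exactly dict.items()
    rw [← PySem.Dict.items_eq_map_keys (PySem.Dict.ofList dic)
          (PySem.Dict.nodup_keys_ofList dic) 0]
    set t := (PySem.Dict.ofList dic).items with ht
    have htnodup : (t.map Prod.fst).Nodup := PySem.Dict.nodup_keys_ofList dic
    -- A's append loops are maps
    rw [PySem.List.foldl_append_singleton_eq_map, pvFoldlAppendBranch, List.nil_append,
        List.nil_append, List.map_map]
    -- the chunk size as a natural number
    have hlen : PySem.List.len t = (t.length : Int) := PySem.List.len_eq t
    have hsz : PySem.Int.floordiv (PySem.List.len t) N = ((t.length / (m + 1) : Nat) : Int) := by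
      rw [hlen, hm]
      exact_mod_cast PySem.Int.floordiv_natCast t.length (m + 1)
    set s : Nat := t.length / (m + 1) with hs
    rw [hsz]
    apply List.ext_getElem?
    intro k
    rw [List.getElem?_map, List.getElem?_map, pvFoldlModifyGet?, List.getElem?_map,
        Option.map_map, Option.map_map]
    rcases Nat.lt_or_ge k N.toNat with hk | hk
    · -- in range: both sides are `some` of the k-th chunk
      have hr : (PySem.List.pyRange 0 N)[k]? = some ((0 : Int) + k) := by
        rw [PySem.List.pyRange_one, List.getElem?_map, List.getElem?_range (by simpa using hk)]
        rfl
      rw [hr]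
      simp only [Option.map_some, Function.comp_apply, zero_add]
      congr 1
      have hN1 : N - 1 = ((m : Nat) : Int) := by omega
      have hk' : k ≤ m := by omega
      rw [hN1]
      -- B side: route-filter characterisation, then the fresh-insert loop is the dict of the slice
      have hroute := pvRouteFilter t m s k hk'
      have hfoldmap :
          (List.foldl (fun a x => a.insert x.2.1 x.2.2) (PySem.Dict.empty : PySem.Dict String Int)
              (List.filter (fun x => ((if ((s : Nat) : Int) > 0
                  then min (PySem.Int.floordiv x.1 ((s : Nat) : Int)) ((m : Nat) : Int)
                  else ((m : Nat) : Int)).toNat == k)) (PySem.List.enumerate t)))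
            = List.foldl (fun a q => a.insert q.1 q.2) PySem.Dict.empty
                (if k = m then t.drop (s * k) else (t.drop (s * k)).take s) := by
        rw [← hroute]
        exact (List.foldl_map (f := Prod.snd)
          (g := fun (a : PySem.Dict String Int) (q : String × Int) => a.insert q.1 q.2)).symm
      rw [hfoldmap]
      by_cases hkm : k = m
      · rw [if_pos hkm]
        rw [PySem.Dict.items_foldl_insert_fresh (t.drop (s * k)) Prod.fst Prod.snd
          PySem.Dict.empty (fun a _ => by simp [pysem]) (pvNodupDrop t htnodup (s * k))]
        -- A side: k = m is the last index, the else branch takes the tail slice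
        rw [if_neg (by omega : ¬ ((k : Nat) : Int) ≠ ((m : Nat) : Int))]
        have hc : ((s : Nat) : Int) * ((k : Nat) : Int) = ((s * k : Nat) : Int) := by push_cast; ring
        rw [hc, PySem.List.slice_from_natCast,
          pvItems_ofList (t.drop (s * k)) (pvNodupDrop t htnodup (s * k))]
        simp [PySem.Dict.empty]
      · rw [if_neg hkm]
        rw [PySem.Dict.items_foldl_insert_fresh ((t.drop (s * k)).take s) Prod.fst Prod.snd
          PySem.Dict.empty (fun a _ => by simp [pysem]) (pvNodupDropTake t htnodup (s * k) s)]
        -- A side: an interior index takes the [s*k, s*(k+1)) slice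
        rw [if_pos (by omega : ((k : Nat) : Int) ≠ ((m : Nat) : Int))]
        have hc1 : ((s : Nat) : Int) * ((k : Nat) : Int) = ((s * k : Nat) : Int) := by push_cast; ring
        have hc2 : ((s : Nat) : Int) * (((k : Nat) : Int) + 1) = ((s * k : Nat) : Int) + ((s : Nat) : Int) := by push_cast; ring
        rw [hc1, hc2, PySem.List.slice_natCast_add,
          pvItems_ofList ((t.drop (s * k)).take s) (pvNodupDropTake t htnodup (s * k) s)]
        simp [PySem.Dict.empty]
    · -- out of range: both sides are `none`
      have hr : (PySem.List.pyRange 0 N)[k]? = none := by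
        rw [List.getElem?_eq_none_iff, PySem.List.pyRange_one, List.length_map,
          List.length_range]
        simpa using hk
      rw [hr]
      rfl
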